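-- pv_equiv track=rewrite | github.com/PUFAI/GibberishGPT | models/miniGPT.py | group_texts
-- ===== SOURCE A (Python) =====
-- block_size = 512  # GPT-2 uses a context length of 1024 tokens
--
-- def group_texts(examples):
--     concatenated = []
--     for ids in examples["input_ids"]:
--         concatenated.extend(ids)
--
--     total_length = (len(concatenated) // block_size) * block_size
--     concatenated = concatenated[:total_length]
--
--     return {"input_ids": [concatenated[i : i + block_size]
--             for i in range(0, total_length, block_size)]}
-- ===== SOURCE B (Python) =====
-- block_size = 512  # GPT-2 uses a context length of 1024 tokens
--
-- def group_texts(examples):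
--     # Single streaming pass: carry a buffer, emit each full block as soon as it forms.
--     buffer = []
--     results = []
--     for ids in examples["input_ids"]:
--         buffer.extend(ids)
--         while len(buffer) >= block_size:
--             results.append(buffer[:block_size])
--             buffer = buffer[block_size:]
--     return {"input_ids": results}
-- ===== Notes on version B (the rewrite author's own statement) =====
-- stated objective: alternative
-- what changed: B streams once over the example lists with a carry buffer, emitting each completed 512-token block as it forms, instead of A's build-the-full-concatenation-then-index-slice two-pass structure.
import Mathlib
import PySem

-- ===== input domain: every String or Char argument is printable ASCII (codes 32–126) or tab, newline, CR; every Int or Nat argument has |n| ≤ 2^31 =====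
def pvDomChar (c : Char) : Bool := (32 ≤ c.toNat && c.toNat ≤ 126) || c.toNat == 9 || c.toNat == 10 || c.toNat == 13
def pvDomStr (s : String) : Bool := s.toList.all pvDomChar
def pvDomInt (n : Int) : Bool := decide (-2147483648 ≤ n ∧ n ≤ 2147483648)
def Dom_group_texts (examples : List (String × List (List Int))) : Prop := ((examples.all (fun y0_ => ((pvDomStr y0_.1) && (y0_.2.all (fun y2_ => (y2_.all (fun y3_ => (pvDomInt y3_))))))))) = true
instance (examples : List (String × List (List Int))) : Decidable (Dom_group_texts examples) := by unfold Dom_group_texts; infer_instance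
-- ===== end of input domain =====

-- B replaces A's concatenate-then-slice two-pass structure by a single streaming fold
-- with a carry buffer that emits each 512-token block as it completes (objective: alternative).

-- ===== PORT A =====
def group_texts (examples : List (String × List (List Int))) : List (String × List (List Int)) :=
  match examples.lookup "input_ids" with
  | none => []  -- Python raises KeyError here; excluded by Pre_group_texts
  | some idsList =>
      let concatenated := idsList.foldl (fun acc ids => acc ++ ids) ([] : List Int)
      let total : Int := (PySem.Int.floordiv (concatenated.length : Int) 512) * 512
      let concatenated := PySem.List.slice concatenated none (some total)
      [("input_ids",
        (PySem.List.pyRange 0 total 512).map (fun i =>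
          PySem.List.slice concatenated (some i) (some (i + 512))))]

-- ===== PORT B =====
-- the 'while len(buffer) >= 512' loop of Source B; buffer[:512] / buffer[512:] are
-- List.take 512 / List.drop 512 exactly (nonnegative in-range slices)
def drainB (res : List (List Int)) (buf : List Int) : List (List Int) × List Int :=
  if 512 ≤ buf.length then drainB (res ++ [buf.take 512]) (buf.drop 512) else (res, buf)
termination_by buf.length
decreasing_by simp; omega

def group_texts_alt (examples : List (String × List (List Int))) : List (String × List (List Int)) :=
  match examples.lookup "input_ids" with
  | none => []  -- Python raises KeyError here; excluded by Pre_group_texts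
  | some idsList =>
      let st := idsList.foldl (fun st ids => drainB st.1 (st.2 ++ ids))
                  (([] : List (List Int)), ([] : List Int))
      [("input_ids", st.1)]

-- ===== PRECONDITION & SPEC =====
-- Pre_ excludes exactly the inputs without an "input_ids" key, on which Python A raises KeyError.
def Pre_group_texts (examples : List (String × List (List Int))) : Prop :=
  (examples.lookup "input_ids").isSome = true
instance (examples : List (String × List (List Int))) : Decidable (Pre_group_texts examples) := by
  unfold Pre_group_texts; infer_instance
def pvWitness_group_texts : (List (String × List (List Int))) := [("input_ids", [[1, 2, 3], []])]

def Spec_group_texts (examples : List (String × List (List Int))) (out : List (String × List (List Int))) : Prop := out = group_texts_alt examples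
instance (examples : List (String × List (List Int))) (out : List (String × List (List Int))) : Decidable (Spec_group_texts examples out) := by unfold Spec_group_texts; infer_instance

-- ===== CLAIM (what is proved, stated in full; the proofs are below) =====
def Claim_equal_group_texts : Prop := ∀ (examples : List (String × List (List Int))), Dom_group_texts examples → Pre_group_texts examples → Spec_group_texts examples (group_texts examples)

-- ===== LEMMAS AND PROOFS =====

-- greedy chunker: the complete 512-blocks of l together with the (<512) remainder
def chunksRem (l : List Int) : List (List Int) × List Int :=
  if 512 ≤ l.length then
    let p := chunksRem (l.drop 512)
    (l.take 512 :: p.1, p.2)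
  else ([], l)
termination_by l.length
decreasing_by simp; omega

theorem drainB_eq (res : List (List Int)) (buf : List Int) :
    drainB res buf = (res ++ (chunksRem buf).1, (chunksRem buf).2) := by
  fun_induction drainB res buf with
  | case1 res buf h ih =>
      rw [chunksRem]
      simp [h, ih]
  | case2 res buf h =>
      rw [chunksRem]
      simp [h]

theorem chunksRem_append (x y : List Int) :
    chunksRem (x ++ y) =
      ((chunksRem x).1 ++ (chunksRem ((chunksRem x).2 ++ y)).1,
       (chunksRem ((chunksRem x).2 ++ y)).2) := by
  fun_induction chunksRem x with
  | case1 x h p ih =>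
      rw [chunksRem]
      have hlen : 512 ≤ (x ++ y).length := by rw [List.length_append]; omega
      have ht : (x ++ y).take 512 = x.take 512 := List.take_append_of_le_length h
      have hd : (x ++ y).drop 512 = x.drop 512 ++ y := List.drop_append_of_le_length h
      rw [if_pos hlen, ht, hd]
      simp only [ih, p]
      simp [List.cons_append]
  | case2 x h =>
      simp

theorem foldl_drain (lst : List (List Int)) : ∀ s : List Int,
    lst.foldl (fun st ids => drainB st.1 (st.2 ++ ids)) (chunksRem s)
      = chunksRem (s ++ lst.flatten) := by
  induction lst with
  | nil => intro s; simp
  | cons ids rest ih =>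
      intro s
      have hstep : drainB (chunksRem s).1 ((chunksRem s).2 ++ ids) = chunksRem (s ++ ids) := by
        rw [drainB_eq]
        conv_rhs => rw [chunksRem_append s ids]
      simp only [List.foldl_cons, hstep, ih (s ++ ids), List.flatten_cons, List.append_assoc]

theorem foldl_concat (lst : List (List Int)) : ∀ a : List Int,
    lst.foldl (fun acc ids => acc ++ ids) a = a ++ lst.flatten := by
  induction lst with
  | nil => intro a; simp
  | cons ids rest ih => intro a; simp [ih]

theorem chunksRem_nil : chunksRem [] = ([], []) := by rw [chunksRem]; simp

-- core of the A side: range-indexed slicing of the truncated list yields the greedy chunks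
theorem slices_eq_chunks : ∀ (k : Nat) (l : List Int), l.length / 512 = k →
    (List.range k).map (fun j => ((l.take (512 * k)).drop (512 * j)).take 512)
      = (chunksRem l).1 := by
  intro k
  induction k with
  | zero =>
      intro l hl
      rw [chunksRem]
      have : ¬ 512 ≤ l.length := by omega
      simp [this]
  | succ k ih =>
      intro l hl
      have hlen : 512 ≤ l.length := by omega
      rw [chunksRem]
      simp only [hlen, if_pos]
      rw [List.range_succ_eq_map]
      simp only [List.map_cons, List.map_map]
      congr 1
      · -- head block
        rw [Nat.mul_zero, List.drop_zero, List.take_take]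
        have hmin : min 512 (512 * (k + 1)) = 512 := by omega
        rw [hmin]
      · -- tail blocks
        have hrec : (l.drop 512).length / 512 = k := by
          simp; omega
        rw [← ih (l.drop 512) hrec]
        apply List.map_congr_left
        intro j _
        simp only [Function.comp_apply]
        have h1 : 512 * (k + 1) = 512 + 512 * k := by ring
        have h2 : 512 * (j + 1) = 512 + 512 * j := by ring
        rw [h1, h2, List.take_add]
        have h3 : (l.take 512).length = 512 := by simp; omega
        rw [show 512 + 512 * j = (l.take 512).length + 512 * j by rw [h3]]
        rw [List.drop_append]
        have h4 : List.drop ((List.take 512 l).length + 512 * j) (List.take 512 l) = [] :=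
          List.drop_eq_nil_of_le (by omega)
        have h5 : (List.take 512 l).length + 512 * j - (List.take 512 l).length = 512 * j := by
          omega
        rw [h4, h5, List.nil_append]

theorem A_eq_chunks (l : List Int) :
    (PySem.List.pyRange 0 ((PySem.Int.floordiv (l.length : Int) 512) * 512) 512).map (fun i =>
        PySem.List.slice (PySem.List.slice l none (some ((PySem.Int.floordiv (l.length : Int) 512) * 512)))
          (some i) (some (i + 512)))
      = (chunksRem l).1 := by
  set k : Nat := l.length / 512 with hk
  have hfd : PySem.Int.floordiv (l.length : Int) 512 = (k : Int) := by
    rw [PySem.Int.floordiv_eq_ediv_of_pos (by norm_num)]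
    rw [hk]
    push_cast
    rfl
  have htot : (PySem.Int.floordiv (l.length : Int) 512) * 512 = ((512 * k : Nat) : Int) := by
    rw [hfd]; push_cast; ring
  rw [htot, PySem.List.slice_to_natCast]
  rw [PySem.List.pyRange_of_pos 0 ((512 * k : Nat) : Int) (by norm_num)]
  have hrange : (if (0 : Int) < ((512 * k : Nat) : Int)
      then ((((512 * k : Nat) : Int) - 0 + 512 - 1) / 512).toNat else 0) = k := by
    split_ifs with h
    · have hk0 : 0 < k := by
        by_contra hc
        simp [Nat.eq_zero_of_not_pos hc] at h
      omega
    · omega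
  rw [hrange, List.map_map]
  rw [← slices_eq_chunks k l hk.symm]
  apply List.map_congr_left
  intro j _
  simp only [Function.comp_apply, Int.zero_add]
  have hji : (512 : Int) * (j : Int) = ((512 * j : Nat) : Int) := by push_cast; ring
  have hji2 : (512 : Int) * (j : Int) + 512 = ((512 * j : Nat) : Int) + ((512 : Nat) : Int) := by
    push_cast; ring
  rw [hji2, hji, PySem.List.slice_natCast_add]

-- ===== VERDICT (by name: the statement is the Claim_ definition above) =====
theorem group_texts_spec : Claim_equal_group_texts := by
  intro examples _hdom hpre
  unfold Spec_group_texts group_texts group_texts_alt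
  cases hl : examples.lookup "input_ids" with
  | none => rfl
  | some idsList =>
      simp only []
      congr 1
      congr 1
      rw [foldl_concat idsList []]
      simp only [List.nil_append]
      rw [show (([] : List (List Int)), ([] : List Int)) = chunksRem [] from chunksRem_nil.symm]
      rw [foldl_drain idsList []]
      simp only [List.nil_append]
      exact A_eq_chunks idsList.flatten
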